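-- pv_equiv track=rewrite | github.com/Dtigran5/Smartcode | homework8/176.py | phonetic_spelling
-- ===== SOURCE A (Python) =====
-- def phonetic_spelling(word, index=0):
--     phonetic_alphabet = {
--         'A': 'Alpha', 'B': 'Bravo', 'C': 'Charlie', 'D': 'Delta',
--         'E': 'Echo', 'F': 'Foxtrot', 'G': 'Golf', 'H': 'Hotel',
--         'I': 'India', 'J': 'Juliet', 'K': 'Kilo', 'L': 'Lima',
--         'M': 'Mike', 'N': 'November', 'O': 'Oscar', 'P': 'Papa',
--         'Q': 'Quebec', 'R': 'Romeo', 'S': 'Sierra', 'T': 'Tango',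
--         'U': 'Uniform', 'V': 'Victor', 'W': 'Whiskey', 'X': 'Xray',
--         'Y': 'Yankee', 'Z': 'Zulu'
--     }
--
--     if index < len(word):
--         char = word[index].upper()
--         if char in phonetic_alphabet:
--             return phonetic_alphabet[char] + ' ' + phonetic_spelling(word, index + 1)
--         else:
--             return phonetic_spelling(word, index + 1)
--     return ''
-- ===== SOURCE B (Python) =====
-- def phonetic_spelling(word, index=0):
--     codes = ('Alpha', 'Bravo', 'Charlie', 'Delta', 'Echo', 'Foxtrot', 'Golf',
--              'Hotel', 'India', 'Juliet', 'Kilo', 'Lima', 'Mike', 'November',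
--              'Oscar', 'Papa', 'Quebec', 'Romeo', 'Sierra', 'Tango', 'Uniform',
--              'Victor', 'Whiskey', 'Xray', 'Yankee', 'Zulu')
--     result = ''
--     for ch in word[index:]:
--         u = ch.upper()
--         if 'A' <= u <= 'Z':
--             result += codes[ord(u) - ord('A')] + ' '
--     return result
-- ===== Notes on version B (the rewrite author's own statement) =====
-- stated objective: alternative
-- what changed: Replaces the dict-membership index-passing recursion with an iterative pass over the slice word[index:] that range-tests 'A'<=u<='Z' and indexes a tuple of codes by ord(u)-ord('A'), accumulating into a string.
-- intended difference: For a negative start index -len(word) <= index < 0 on a word containing an ASCII letter, A's word[index] wraps around and, once the index reaches 0, A spells the tail AND then the whole word again (e.g. A('ab',-1)='Bravo Alpha Bravo '), while B spells only word[index:] ('Bravo '), which is the intended meaning of the start offset. — e.g. on phonetic_spelling("ab", -1): A returns "Bravo Alpha Bravo ", B returns "Bravo "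
import Mathlib
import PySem

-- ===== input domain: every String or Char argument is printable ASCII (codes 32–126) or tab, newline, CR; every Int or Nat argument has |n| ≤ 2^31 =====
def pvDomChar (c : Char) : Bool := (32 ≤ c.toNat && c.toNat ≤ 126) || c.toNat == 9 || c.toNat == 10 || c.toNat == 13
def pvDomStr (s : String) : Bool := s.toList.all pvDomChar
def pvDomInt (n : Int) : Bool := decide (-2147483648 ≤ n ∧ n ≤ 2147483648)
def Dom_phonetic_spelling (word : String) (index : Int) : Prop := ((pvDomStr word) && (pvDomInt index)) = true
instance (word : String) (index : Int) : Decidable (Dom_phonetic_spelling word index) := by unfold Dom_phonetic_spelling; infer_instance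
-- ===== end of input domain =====

-- B replaces A's dict-membership index-passing recursion by one iterative pass over the slice
-- word[index:], range-testing 'A' <= u <= 'Z' and indexing a tuple of codes by ord(u)-ord('A')
-- (alternative); outside D_ (A's negative-index wraparound) the outputs agree.

-- ===== PORT A =====
-- the phonetic_alphabet dict literal of A
def pvNato : PySem.Dict Char (List Char) := PySem.Dict.ofList
  [('A', "Alpha".toList), ('B', "Bravo".toList), ('C', "Charlie".toList), ('D', "Delta".toList),
   ('E', "Echo".toList), ('F', "Foxtrot".toList), ('G', "Golf".toList), ('H', "Hotel".toList),
   ('I', "India".toList), ('J', "Juliet".toList), ('K', "Kilo".toList), ('L', "Lima".toList),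
   ('M', "Mike".toList), ('N', "November".toList), ('O', "Oscar".toList), ('P', "Papa".toList),
   ('Q', "Quebec".toList), ('R', "Romeo".toList), ('S', "Sierra".toList), ('T', "Tango".toList),
   ('U', "Uniform".toList), ('V', "Victor".toList), ('W', "Whiskey".toList), ('X', "Xray".toList),
   ('Y', "Yankee".toList), ('Z', "Zulu".toList)]

-- A's recursion on the character list (word[index] = pyGet?; none = IndexError, outside Pre_)
def pvSpellA (cs : List Char) (index : Int) : List Char :=
  if _h : index < (cs.length : Int) then
    match PySem.List.pyGet? cs index with
    | none => []      -- Python raises IndexError here; excluded by Pre_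
    | some c =>
      match pvNato.get? (PySem.Chars.upperChar c) with
      | some v => v ++ [' '] ++ pvSpellA cs (index + 1)
      | none => pvSpellA cs (index + 1)
  else []
termination_by ((cs.length : Int) - index).toNat
decreasing_by omega

def phonetic_spelling (word : String) (index : Int) : String :=
  String.ofList (pvSpellA word.toList index)

-- ===== PORT B =====
-- B's tuple of codes, indexed by ord(u) - ord('A')
def pvCodes : List (List Char) :=
  ["Alpha".toList, "Bravo".toList, "Charlie".toList, "Delta".toList, "Echo".toList,
   "Foxtrot".toList, "Golf".toList, "Hotel".toList, "India".toList, "Juliet".toList,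
   "Kilo".toList, "Lima".toList, "Mike".toList, "November".toList, "Oscar".toList,
   "Papa".toList, "Quebec".toList, "Romeo".toList, "Sierra".toList, "Tango".toList,
   "Uniform".toList, "Victor".toList, "Whiskey".toList, "Xray".toList, "Yankee".toList,
   "Zulu".toList]

-- B's loop body: u = ch.upper(); if 'A' <= u <= 'Z': result += codes[ord(u)-ord('A')] + ' '
-- (the tuple index is in range whenever the guard holds, so getD's default is unreachable)
def pvStepB (result : List Char) (ch : Char) : List Char :=
  let u := PySem.Chars.upperChar ch
  if 'A' ≤ u ∧ u ≤ 'Z' then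
    result ++ (PySem.List.pyGet? pvCodes ((u.toNat : Int) - 65)).getD [] ++ [' ']
  else result

def phonetic_spelling_alt (word : String) (index : Int) : String :=
  String.ofList ((PySem.List.slice word.toList (some index) none).foldl pvStepB [])

-- ===== PRECONDITION & SPEC =====
-- Pre_ excludes exactly the inputs on which A raises IndexError: index < -len(word)
def Pre_phonetic_spelling (word : String) (index : Int) : Prop :=
  -(word.toList.length : Int) ≤ index
instance (word : String) (index : Int) : Decidable (Pre_phonetic_spelling word index) := by
  unfold Pre_phonetic_spelling; infer_instance
def pvWitness_phonetic_spelling : String × Int := ("ab", 0)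

-- For -len(word) ≤ index < 0 on a word containing an ASCII letter, A's word[index] wraps around
-- and, after the index reaches 0, A spells the tail AND then the whole word again; B spells only
-- word[index:], the intended meaning of the start offset.
def D_phonetic_spelling (word : String) (index : Int) : Prop :=
  index < 0 ∧ word.toList.any PySem.Chars.isalpha = true
instance (word : String) (index : Int) : Decidable (D_phonetic_spelling word index) := by
  unfold D_phonetic_spelling; infer_instance
def Spec_phonetic_spelling (word : String) (index : Int) (out : String) : Prop :=
  ¬ D_phonetic_spelling word index → out = phonetic_spelling_alt word index
instance (word : String) (index : Int) (out : String) : Decidable (Spec_phonetic_spelling word index out) := by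
  unfold Spec_phonetic_spelling; infer_instance
def pvDiffWitness_phonetic_spelling : String × Int := ("ab", -1)
def pvDiffWitnessOut_phonetic_spelling : String × String := ("Bravo Alpha Bravo ", "Bravo ")

-- ===== CLAIM (what is proved, stated in full; the proofs are below) =====
def Claim_unchanged_phonetic_spelling : Prop := ∀ (word : String) (index : Int), Dom_phonetic_spelling word index → Pre_phonetic_spelling word index → Spec_phonetic_spelling word index (phonetic_spelling word index)
def Claim_changed_phonetic_spelling : Prop := Dom_phonetic_spelling (pvDiffWitness_phonetic_spelling.1) (pvDiffWitness_phonetic_spelling.2) ∧ Pre_phonetic_spelling (pvDiffWitness_phonetic_spelling.1) (pvDiffWitness_phonetic_spelling.2) ∧ D_phonetic_spelling (pvDiffWitness_phonetic_spelling.1) (pvDiffWitness_phonetic_spelling.2) ∧ phonetic_spelling (pvDiffWitness_phonetic_spelling.1) (pvDiffWitness_phonetic_spelling.2) = pvDiffWitnessOut_phonetic_spelling.1 ∧ phonetic_spelling_alt (pvDiffWitness_phonetic_spelling.1) (pvDiffWitness_phonetic_spelling.2) = pvDiffWitnessOut_phonetic_spelling.2 ∧ pvDiffWitnessOut_phonetic_spelling.1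 ≠ pvDiffWitnessOut_phonetic_spelling.2
def Claim_exact_phonetic_spelling : Prop := ∀ (word : String) (index : Int), Dom_phonetic_spelling word index → Pre_phonetic_spelling word index → D_phonetic_spelling word index → phonetic_spelling word index ≠ phonetic_spelling_alt word index

-- ===== LEMMAS AND PROOFS =====

-- the contribution of one character (as A computes it), and of a character list
def pvG (c : Char) : List Char :=
  match pvNato.get? (PySem.Chars.upperChar c) with
  | some v => v ++ [' ']
  | none => []

def pvSpell (l : List Char) : List Char := l.flatMap pvG

lemma pvSpell_cons (c : Char) (t : List Char) : pvSpell (c :: t) = pvG c ++ pvSpell t := by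
  unfold pvSpell; rw [List.flatMap_cons]

set_option maxHeartbeats 1000000 in
lemma natoGet_none (x : Char) (hx : PySem.Chars.isupper x = false) : pvNato.get? x = none := by
  rw [PySem.Dict.get?_eq_none_iff_not_mem_keys]
  intro hmem
  rw [show pvNato.keys = ['A','B','C','D','E','F','G','H','I','J','K','L','M',
    'N','O','P','Q','R','S','T','U','V','W','X','Y','Z'] from by decide] at hmem
  fin_cases hmem <;> exact absurd hx (by decide)

lemma char_le_iff (a b : Char) : a ≤ b ↔ a.toNat ≤ b.toNat := by
  rw [Char.le_def]; exact UInt32.le_iff_toNat_le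

-- for an uppercase letter, A's dict lookup is exactly B's tuple indexing
lemma natoGet_upper (x : Char) (h1 : 65 ≤ x.toNat) (h2 : x.toNat ≤ 90) :
    pvNato.get? x = some ((PySem.List.pyGet? pvCodes ((x.toNat : Int) - 65)).getD []) := by
  have hx := (Char.ofNat_toNat x).symm
  interval_cases h : x.toNat <;> rw [hx] <;> decide

lemma pvStepB_eq (acc : List Char) (c : Char) : pvStepB acc c = acc ++ pvG c := by
  unfold pvStepB pvG
  by_cases h : 'A' ≤ PySem.Chars.upperChar c ∧ PySem.Chars.upperChar c ≤ 'Z'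
  · rw [if_pos h]
    have hA : 'A'.toNat = 65 := by decide
    have hZ : 'Z'.toNat = 90 := by decide
    have h1 : 65 ≤ (PySem.Chars.upperChar c).toNat := by
      have := (char_le_iff _ _).mp h.1; omega
    have h2 : (PySem.Chars.upperChar c).toNat ≤ 90 := by
      have := (char_le_iff _ _).mp h.2; omega
    rw [natoGet_upper _ h1 h2, List.append_assoc]
  · rw [if_neg h]
    have hu : PySem.Chars.isupper (PySem.Chars.upperChar c) = false := by
      apply Bool.eq_false_iff.mpr
      intro ht
      exact h (by simpa [PySem.Chars.isupper] using ht)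
    rw [natoGet_none _ hu, List.append_nil]

lemma pvFoldlB (l : List Char) (acc : List Char) :
    l.foldl pvStepB acc = acc ++ pvSpell l := by
  induction l generalizing acc with
  | nil => simp [pvSpell]
  | cons c t ih =>
    rw [List.foldl_cons, pvStepB_eq, ih, pvSpell_cons, List.append_assoc]

lemma natoGet_isSome (x : Char) (hx : PySem.Chars.isupper x = true) :
    (pvNato.get? x).isSome = true := by
  unfold PySem.Chars.isupper at hx
  simp only [Bool.and_eq_true, decide_eq_true_eq] at hx
  have hA : 'A'.toNat = 65 := by decide
  have hZ : 'Z'.toNat = 90 := by decide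
  have h1 := (char_le_iff _ _).mp hx.1
  have h2 := (char_le_iff _ _).mp hx.2
  rw [natoGet_upper x (by omega) (by omega)]; rfl

lemma upperChar_isupper (c : Char) (h : PySem.Chars.isalpha c = true) :
    PySem.Chars.isupper (PySem.Chars.upperChar c) = true := by
  unfold PySem.Chars.isalpha at h
  rw [Bool.or_eq_true] at h
  unfold PySem.Chars.upperChar
  rcases h with h | h
  · rw [if_neg]
    · exact h
    · intro hl
      unfold PySem.Chars.isupper at h
      unfold PySem.Chars.islower at hl
      simp only [Bool.and_eq_true, decide_eq_true_eq, char_le_iff] at h hl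
      have hZ : 'Z'.toNat = 90 := by decide
      have ha : 'a'.toNat = 97 := by decide
      omega
  · rw [if_pos h]
    unfold PySem.Chars.islower at h
    simp only [Bool.and_eq_true, decide_eq_true_eq, char_le_iff] at h
    have ha : 'a'.toNat = 97 := by decide
    have hz : 'z'.toNat = 122 := by decide
    have hval : (Char.ofNat (c.toNat - 32)).toNat = c.toNat - 32 := by
      rw [Char.toNat_ofNat, if_pos (Or.inl (by omega))]
    unfold PySem.Chars.isupper
    simp only [Bool.and_eq_true, decide_eq_true_eq, char_le_iff, hval]
    have hA : 'A'.toNat = 65 := by decide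
    have hZ : 'Z'.toNat = 90 := by decide
    omega

lemma pvG_eq_nil (c : Char) (h : PySem.Chars.isalpha c = false) : pvG c = [] := by
  unfold PySem.Chars.isalpha at h
  rw [Bool.or_eq_false_iff] at h
  unfold pvG
  rw [show PySem.Chars.upperChar c = c from by unfold PySem.Chars.upperChar; rw [if_neg (by rw [h.2]; simp)]]
  rw [natoGet_none c h.1]

lemma pvG_ne_nil (c : Char) (h : PySem.Chars.isalpha c = true) : pvG c ≠ [] := by
  have hs := natoGet_isSome _ (upperChar_isupper c h)
  unfold pvG
  cases hg : pvNato.get? (PySem.Chars.upperChar c) with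
  | none => rw [hg] at hs; simp at hs
  | some v => simp

lemma pvSpell_nil (l : List Char) (h : l.any PySem.Chars.isalpha = false) : pvSpell l = [] := by
  induction l with
  | nil => rfl
  | cons c t ih =>
    rw [List.any_cons, Bool.or_eq_false_iff] at h
    rw [pvSpell_cons, pvG_eq_nil c h.1, ih h.2]
    rfl

lemma pvSpell_ne_nil (l : List Char) (h : l.any PySem.Chars.isalpha = true) : pvSpell l ≠ [] := by
  induction l with
  | nil => simp at h
  | cons c t ih =>
    rw [pvSpell_cons]
    by_cases hc : PySem.Chars.isalpha c = true
    · have := pvG_ne_nil c hc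
      intro he; rw [List.append_eq_nil_iff] at he; exact this he.1
    · rw [List.any_cons, Bool.or_eq_true] at h
      rcases h with h | h
      · exact absurd h hc
      · intro he; rw [List.append_eq_nil_iff] at he; exact ih h he.2

-- A's recursion from a nonnegative index spells the suffix word[index:]
lemma pvSpellA_nat (cs : List Char) : ∀ (m n : Nat), cs.length - n = m →
    pvSpellA cs (n : Int) = pvSpell (cs.drop n) := by
  intro m
  induction m with
  | zero =>
    intro n hn
    have hlen : cs.length ≤ n := by omega
    rw [pvSpellA, dif_neg (by exact_mod_cast not_lt.mpr hlen), List.drop_eq_nil_of_le hlen]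
    rfl
  | succ m ih =>
    intro n hn
    have hlt : n < cs.length := by omega
    rw [pvSpellA, dif_pos (by exact_mod_cast hlt)]
    rw [PySem.List.pyGet?_natCast, List.getElem?_eq_getElem hlt]
    have hrec : pvSpellA cs ((n : Int) + 1) = pvSpell (cs.drop (n + 1)) := by
      have := ih (n + 1) (by omega)
      rw [← this]; norm_num
    rw [List.drop_eq_getElem_cons hlt, pvSpell_cons]
    cases hg : pvNato.get? (PySem.Chars.upperChar cs[n]) with
    | none =>
      rw [show pvG cs[n] = [] from by unfold pvG; rw [hg]]
      simpa [hg] using hrec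
    | some v =>
      rw [show pvG cs[n] = v ++ [' '] from by unfold pvG; rw [hg]]
      simp only [hg]
      rw [hrec, List.append_assoc]

-- A's recursion from -k (k ≤ len) spells the last k characters, then the whole word again
lemma pvSpellA_neg (cs : List Char) : ∀ (k : Nat), k ≤ cs.length →
    pvSpellA cs (-(k : Int)) = pvSpell (cs.drop (cs.length - k)) ++ pvSpell cs := by
  intro k
  induction k with
  | zero =>
    have h0 : pvSpellA cs ((0 : Nat) : Int) = pvSpell (cs.drop 0) := pvSpellA_nat cs cs.length 0 (by omega)
    intro _
    simp only [Nat.cast_zero, neg_zero] at *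
    rw [h0, List.drop_zero, Nat.sub_zero, List.drop_length]
    rfl
  | succ k ih =>
    intro hk
    rw [pvSpellA, dif_pos (by push_cast; omega)]
    rw [PySem.List.pyGet?_neg_natCast cs (k + 1) (by omega) hk]
    have hidx : cs.length - (k + 1) < cs.length := by omega
    rw [List.getElem?_eq_getElem hidx]
    have harg : -((k + 1 : Nat) : Int) + 1 = -(k : Int) := by push_cast; ring
    have hrec : pvSpellA cs (-((k + 1 : Nat) : Int) + 1) = pvSpell (cs.drop (cs.length - k)) ++ pvSpell cs := by
      rw [harg]; exact ih (by omega)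
    have hdrop : cs.drop (cs.length - (k + 1)) = cs[cs.length - (k + 1)] :: cs.drop (cs.length - k) := by
      have hsucc : cs.length - (k + 1) + 1 = cs.length - k := by omega
      rw [List.drop_eq_getElem_cons hidx, hsucc]
    rw [hdrop, pvSpell_cons]
    cases hg : pvNato.get? (PySem.Chars.upperChar cs[cs.length - (k + 1)]) with
    | none =>
      rw [show pvG cs[cs.length - (k + 1)] = [] from by unfold pvG; rw [hg]]
      simpa [hg] using hrec
    | some v =>
      rw [show pvG cs[cs.length - (k + 1)] = v ++ [' '] from by unfold pvG; rw [hg]]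
      simp only [hg]
      rw [hrec]; simp [List.append_assoc]

-- B computes pvSpell of the clamped suffix
lemma alt_eq (word : String) (index : Int) :
    phonetic_spelling_alt word index =
      String.ofList (pvSpell (word.toList.drop (PySem.List.clampIdx word.toList.length index))) := by
  unfold phonetic_spelling_alt
  rw [PySem.List.slice_some_none, pvFoldlB]
  rfl

-- ===== VERDICT (by name: the statement is the Claim_ definition above) =====
theorem phonetic_spelling_spec : Claim_unchanged_phonetic_spelling := by
  intro word index _hdom hpre hnd
  unfold Pre_phonetic_spelling at hpre
  rw [alt_eq]
  unfold phonetic_spelling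
  by_cases hi : 0 ≤ index
  · obtain ⟨n, rfl⟩ : ∃ n : Nat, index = (n : Int) := ⟨index.toNat, (Int.toNat_of_nonneg hi).symm⟩
    rw [pvSpellA_nat word.toList (word.toList.length - n) n rfl]
    rw [PySem.List.clampIdx_natCast]
    by_cases hn : n ≤ word.toList.length
    · rw [min_eq_left hn]
    · rw [min_eq_right (by omega), List.drop_length,
        List.drop_eq_nil_of_le (by omega)]
  · have hany : word.toList.any PySem.Chars.isalpha = false := by
      unfold D_phonetic_spelling at hnd
      rcases h : word.toList.any PySem.Chars.isalpha
      · rfl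
      · exact absurd ⟨by omega, h⟩ hnd
    obtain ⟨k, hk0, rfl⟩ : ∃ k : Nat, 0 < k ∧ index = -(k : Int) :=
      ⟨(-index).toNat, by omega, by omega⟩
    have hkl : k ≤ word.toList.length := by omega
    rw [pvSpellA_neg word.toList k hkl, PySem.List.clampIdx_neg_natCast _ _ hk0]
    have hsub : ∀ m : Nat, pvSpell (word.toList.drop m) = [] := by
      intro m
      apply pvSpell_nil
      rw [List.any_eq_false]
      intro c hc
      rw [List.any_eq_false] at hany
      exact hany c (List.mem_of_mem_drop hc)
    rw [hsub, pvSpell_nil _ hany]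
    rfl

theorem phonetic_spelling_changed : Claim_changed_phonetic_spelling := by
  unfold Claim_changed_phonetic_spelling
  refine ⟨by decide, by decide, by decide, ?_, by decide, by decide⟩
  show phonetic_spelling "ab" (-1) = "Bravo Alpha Bravo "
  unfold phonetic_spelling
  rw [show (-1 : Int) = -((1 : Nat) : Int) from by norm_num,
    pvSpellA_neg "ab".toList 1 (by decide)]
  decide

theorem phonetic_spelling_tight : Claim_exact_phonetic_spelling := by
  intro word index _hdom hpre hd
  unfold Pre_phonetic_spelling at hpre
  unfold D_phonetic_spelling at hd
  obtain ⟨k, hk0, rfl⟩ : ∃ k : Nat, 0 < k ∧ index = -(k : Int) :=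
    ⟨(-index).toNat, by omega, by omega⟩
  have hkl : k ≤ word.toList.length := by omega
  rw [alt_eq]
  unfold phonetic_spelling
  rw [pvSpellA_neg word.toList k hkl, PySem.List.clampIdx_neg_natCast _ _ hk0]
  intro he
  have hl := congrArg String.toList he
  simp only [String.toList_ofList] at hl
  have : pvSpell word.toList = [] := by
    have := congrArg List.length hl
    simp only [List.length_append] at this
    rw [List.eq_nil_iff_length_eq_zero]
    omega
  exact pvSpell_ne_nil word.toList hd.2 this
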